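-- pv_equiv track=rewrite | github.com/NaxRax/janette_inginen_portfolio | course_projects/python_code/energiatilasto_projekti.py | class_frequencies
-- ===== SOURCE A (Python) =====
-- def class_minimum_value(class_num):
--     """Hakee pienimmän luokkaan kuuluvan arvon. Parametrina luokan numero."""
--     # Jos luokan numero on 0 eli luokka on ensimmäinen, palautetaan valmiiksi
--     # asetettu ensimmäisen luokan pienin arvo eli 0
--     if class_num == 0:
--         return 0
--     # muussa tapauksessa lasketaan luokan numeron perusteella oikea pienin arvo
--     # ja palautetaan se.
--     else:
--         return 10**class_num
--
-- def class_maximum_value(class_num):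
--     """Hakee suurimman luokkaan kuuluvan arvon. Parametrina luokan numero."""
--     # Jos luokan numero 0 eli luokka on ensimmäinen, palautetaan valmiiksi
--     # asetetti ensimmäisen luokan suurin arvo eli 9
--     if class_num == 0:
--         return 9
--     # muussa tapauksessa lasketaan luokan numeron perusteella oikea suurin arvo
--     # ja palautetaan se.
--     else:
--         return 10**(class_num+1) -1
--
-- def class_frequencies(values_list, largest_class_number):
--     """Laskee kuinka monta käyttäjän arvoa löytyy kustakin luokasta ja palauttaa
--         ne listana. Parametreina käyttäjän antamien arvojen lista ja suurimman
--         luokan numero."""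
--     # frequencies list, lista johon lisätään "tähtien" määrä eli kuinka monta arvoa
--     # kussakin luokassa on
--     f_list = []
--     # Aluksi lukuja/"tähtiä" esiintyy 0. Jos arvo kuuluu luokaan, tämä counter nousee yhdellä.
--     frequencies_count = 0
--     # Käydään läpi kaikki luokat suurimpaan luokkaan asti. i on läpi käytävän luokan numero
--     for i in range(0, largest_class_number):
--         # käydään jokaisen luokan kohdalla jokainen käyttäjän antama arvo
--         for value in values_list:
--             # Jos arvo kuuluu luokkaan, counteri nousee yhdellä
--             if class_minimum_value(i) <= value <= class_maximum_value(i):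
--                 frequencies_count = frequencies_count + 1
--         # Lisätään luokkaan kuuluvien arvojen määrä. 0, jos luokkaan ei kuulunut yhtäkään arvoa
--         f_list.append(frequencies_count)
--         # Nollataan counteri
--         frequencies_count = 0
--     # Palautetaan lista
--     return f_list
-- ===== SOURCE B (Python) =====
-- def class_frequencies(values_list, largest_class_number):
--     """Single pass: classify each value by its decimal digit count and
--     increment the matching bucket directly."""
--     n = largest_class_number if largest_class_number > 0 else 0
--     f_list = [0] * n
--     for value in values_list:
--         if value >= 0:
--             k = 0
--             v = value
--             while v >= 10:
--                 v //= 10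
--                 k += 1
--             if k < n:
--                 f_list[k] += 1
--     return f_list
-- ===== Notes on version B (the rewrite author's own statement) =====
-- stated objective: faster
-- what changed: Instead of scanning the whole values list once per class, B makes a single pass over the values, computes each nonnegative value's class directly from its decimal digit count, and increments that bucket.
import Mathlib
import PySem

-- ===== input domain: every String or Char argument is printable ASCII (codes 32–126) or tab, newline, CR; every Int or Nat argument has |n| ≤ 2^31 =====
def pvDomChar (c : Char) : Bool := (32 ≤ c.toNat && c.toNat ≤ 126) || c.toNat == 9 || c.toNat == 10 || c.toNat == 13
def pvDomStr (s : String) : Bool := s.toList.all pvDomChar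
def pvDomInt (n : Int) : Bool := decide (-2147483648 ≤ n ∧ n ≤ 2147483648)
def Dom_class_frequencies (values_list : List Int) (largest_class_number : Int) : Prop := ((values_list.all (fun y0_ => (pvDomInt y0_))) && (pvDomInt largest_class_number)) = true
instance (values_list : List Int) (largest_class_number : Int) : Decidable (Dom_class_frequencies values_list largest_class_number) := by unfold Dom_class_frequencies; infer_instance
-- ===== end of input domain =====

-- B replaces A's per-class rescan of the values by a single pass that buckets each
-- value by its decimal digit count (objective: faster).

-- ===== PORT A =====
-- exponents are taken with .toNat: every call site passes class_num ≥ 0 (from range(0, n)),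
-- where this is exactly Python's 10**class_num
def class_minimum_value (class_num : Int) : Int :=
  if class_num = 0 then 0 else 10 ^ class_num.toNat

def class_maximum_value (class_num : Int) : Int :=
  if class_num = 0 then 9 else 10 ^ (class_num + 1).toNat - 1

def class_frequencies (values_list : List Int) (largest_class_number : Int) : List Int :=
  (PySem.List.pyRange 0 largest_class_number 1).foldl
    (fun f_list i =>
      f_list ++ [values_list.foldl
        (fun frequencies_count value =>
          if class_minimum_value i ≤ value ∧ value ≤ class_maximum_value i then
            frequencies_count + 1
          else frequencies_count) 0]) []

-- ===== PORT B =====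
-- the 'while v >= 10: v //= 10; k += 1' loop of Source B (v is nonnegative there)
def pvWhileDigits (v k : Nat) : Nat :=
  if 10 ≤ v then pvWhileDigits (v / 10) (k + 1) else k
termination_by v
decreasing_by exact Nat.div_lt_self (by omega) (by omega)

-- the body of Source B's 'for value in values_list' loop
def pvStep (n : Nat) (f_list : List Int) (value : Int) : List Int :=
  if 0 ≤ value then
    if pvWhileDigits value.toNat 0 < n then
      f_list.set (pvWhileDigits value.toNat 0)
        (f_list.getD (pvWhileDigits value.toNat 0) 0 + 1)
    else f_list
  else f_list

def class_frequencies_alt (values_list : List Int) (largest_class_number : Int) : List Int :=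
  values_list.foldl
    (pvStep (if largest_class_number > 0 then largest_class_number.toNat else 0))
    (List.replicate (if largest_class_number > 0 then largest_class_number.toNat else 0) 0)

-- ===== PRECONDITION & SPEC =====
def Spec_class_frequencies (values_list : List Int) (largest_class_number : Int) (out : List Int) : Prop := out = class_frequencies_alt values_list largest_class_number
instance (values_list : List Int) (largest_class_number : Int) (out : List Int) : Decidable (Spec_class_frequencies values_list largest_class_number out) := by unfold Spec_class_frequencies; infer_instance

-- ===== CLAIM (what is proved, stated in full; the proofs are below) =====
def Claim_equal_class_frequencies : Prop := ∀ (values_list : List Int) (largest_class_number : Int), Dom_class_frequencies values_list largest_class_number → Spec_class_frequencies values_list largest_class_number (class_frequencies values_list largest_class_number)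

-- ===== LEMMAS AND PROOFS =====

-- shifting the accumulator of the digit-count loop
theorem pvWhileDigits_shift (v : Nat) : ∀ k, pvWhileDigits v k = pvWhileDigits v 0 + k := by
  induction v using Nat.strong_induction_on with
  | _ v ih =>
    intro k
    conv_lhs => rw [pvWhileDigits]
    conv_rhs => rw [pvWhileDigits]
    by_cases h : 10 ≤ v
    · simp only [if_pos h]
      rw [ih (v / 10) (Nat.div_lt_self (by omega) (by omega)) (k + 1),
          ih (v / 10) (Nat.div_lt_self (by omega) (by omega)) 1]
      omega
    · simp [h]

-- characterisation of the digit count for positive inputs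
theorem pvWhileDigits_eq_iff (m : Nat) : ∀ i : Nat, 1 ≤ m →
    (pvWhileDigits m 0 = i ↔ 10 ^ i ≤ m ∧ m < 10 ^ (i + 1)) := by
  induction m using Nat.strong_induction_on with
  | _ m ih =>
    intro i hm
    rw [pvWhileDigits]
    by_cases h : 10 ≤ m
    · simp only [if_pos h]
      rw [pvWhileDigits_shift]
      cases i with
      | zero =>
        constructor
        · omega
        · intro ⟨_, h2⟩; simp [pow_succ] at h2; omega
      | succ j =>
        have hdiv : 1 ≤ m / 10 := Nat.le_div_iff_mul_le (by omega) |>.mpr (by omega)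
        have hIH := ih (m / 10) (Nat.div_lt_self (by omega) (by omega)) j hdiv
        constructor
        · intro he
          have hj : pvWhileDigits (m / 10) 0 = j := by omega
          obtain ⟨h1, h2⟩ := hIH.mp hj
          constructor
          · have h1' : 10 ^ j * 10 ≤ m := (Nat.le_div_iff_mul_le (by omega)).mp h1
            calc 10 ^ (j + 1) = 10 ^ j * 10 := by ring
              _ ≤ m := h1'
          · have h2' : m < 10 ^ (j + 1) * 10 := (Nat.div_lt_iff_lt_mul (by omega)).mp h2
            calc m < 10 ^ (j + 1) * 10 := h2'
              _ = 10 ^ (j + 1 + 1) := by ring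
        · intro ⟨h1, h2⟩
          have h1' : 10 ^ j ≤ m / 10 := (Nat.le_div_iff_mul_le (by omega)).mpr (by
            have : 10 ^ j * 10 = 10 ^ (j + 1) := by ring
            omega)
          have h2' : m / 10 < 10 ^ (j + 1) := (Nat.div_lt_iff_lt_mul (by omega)).mpr (by
            have : 10 ^ (j + 1) * 10 = 10 ^ (j + 1 + 1) := by ring
            omega)
          have := hIH.mpr ⟨h1', h2'⟩
          omega
    · simp only [if_neg h]
      cases i with
      | zero => simp; omega
      | succ j =>
        have h10 : 10 ≤ 10 ^ (j + 1) := by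
          calc 10 = 10 ^ 1 := by norm_num
            _ ≤ 10 ^ (j + 1) := Nat.pow_le_pow_right (by omega) (by omega)
        constructor
        · omega
        · intro ⟨h1, _⟩; omega

-- A's class membership test ↔ B's digit-count classification
theorem pred_equiv (i : Nat) (v : Int) :
    (class_minimum_value (i : Int) ≤ v ∧ v ≤ class_maximum_value (i : Int)) ↔
    (0 ≤ v ∧ pvWhileDigits v.toNat 0 = i) := by
  cases i with
  | zero =>
    have hmin : class_minimum_value ((0 : Nat) : Int) = 0 := by simp [class_minimum_value]
    have hmax : class_maximum_value ((0 : Nat) : Int) = 9 := by simp [class_maximum_value]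
    rw [hmin, hmax]
    constructor
    · intro ⟨h1, h2⟩
      refine ⟨h1, ?_⟩
      rw [pvWhileDigits]
      have h10 : ¬ 10 ≤ v.toNat := by omega
      simp [h10]
    · intro ⟨h1, h2⟩
      refine ⟨h1, ?_⟩
      by_contra hlt
      have hm : 10 ≤ v.toNat := by omega
      rw [pvWhileDigits, if_pos hm, pvWhileDigits_shift] at h2
      omega
  | succ j =>
    have hne : ((j + 1 : Nat) : Int) ≠ 0 := by exact_mod_cast Nat.succ_ne_zero j
    have hmin : class_minimum_value ((j + 1 : Nat) : Int) = ((10 ^ (j + 1) : Nat) : Int) := by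
      rw [class_minimum_value, if_neg hne]
      have h : ((j + 1 : Nat) : Int).toNat = j + 1 := by omega
      rw [h]; push_cast; ring
    have hmax : class_maximum_value ((j + 1 : Nat) : Int) = ((10 ^ (j + 2) : Nat) : Int) - 1 := by
      rw [class_maximum_value, if_neg hne]
      have h : (((j + 1 : Nat) : Int) + 1).toNat = j + 2 := by omega
      rw [h]; push_cast; ring
    rw [hmin, hmax]
    have hp1 : (1 : Nat) ≤ 10 ^ (j + 1) := Nat.one_le_pow _ _ (by omega)
    constructor
    · intro ⟨h1, h2⟩
      have hv0 : 0 ≤ v := by omega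
      refine ⟨hv0, ?_⟩
      have hm1 : 10 ^ (j + 1) ≤ v.toNat := by omega
      have hm2 : v.toNat < 10 ^ (j + 2) := by omega
      exact (pvWhileDigits_eq_iff v.toNat (j + 1) (by omega)).mpr ⟨hm1, hm2⟩
    · intro ⟨h1, h2⟩
      have hm1 : 1 ≤ v.toNat := by
        by_contra hz
        have h0 : v.toNat = 0 := by omega
        rw [h0, pvWhileDigits] at h2
        simp at h2
      obtain ⟨ha, hb⟩ := (pvWhileDigits_eq_iff v.toNat (j + 1) hm1).mp h2
      have hb' : v.toNat < 10 ^ (j + 2) := hb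
      constructor <;> omega

-- A's inner loop is a countP
theorem inner_count (p : Int → Prop) [DecidablePred p] (vs : List Int) : ∀ c : Int,
    vs.foldl (fun frequencies_count value =>
      if p value then frequencies_count + 1 else frequencies_count) c
    = c + ((vs.countP fun v => decide (p v)) : Int) := by
  induction vs with
  | nil => intro c; simp
  | cons v vs ih =>
    intro c
    simp only [List.foldl_cons, List.countP_cons]
    by_cases h : p v
    · simp only [if_pos h, ih, decide_eq_true h]
      push_cast; ring
    · simp [h, ih]

-- A's outer loop is a map over the range
theorem outer_map (g : Int → Int) (r : List Int) : ∀ acc : List Int,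
    r.foldl (fun l i => l ++ [g i]) acc = acc ++ r.map g := by
  induction r with
  | nil => intro acc; simp
  | cons x r ih => intro acc; simp [ih]

theorem pvStep_length (n : Nat) (f : List Int) (v : Int) : (pvStep n f v).length = f.length := by
  unfold pvStep
  split_ifs <;> simp

theorem foldl_pvStep_length (n : Nat) (vs : List Int) : ∀ f : List Int,
    (vs.foldl (pvStep n) f).length = f.length := by
  induction vs with
  | nil => intro f; simp
  | cons v vs ih => intro f; simp [List.foldl_cons, ih, pvStep_length]

theorem foldl_pvStep_getD (n : Nat) (vs : List Int) : ∀ (f : List Int) (i : Nat),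
    i < f.length → f.length = n →
    (vs.foldl (pvStep n) f).getD i 0
      = f.getD i 0 + ((vs.countP fun v => decide (0 ≤ v ∧ pvWhileDigits v.toNat 0 = i)) : Int) := by
  induction vs with
  | nil => intro f i _ _; simp
  | cons v vs ih =>
    intro f i hi hn
    simp only [List.foldl_cons, List.countP_cons]
    rw [ih (pvStep n f v) i (by rw [pvStep_length]; exact hi) (by rw [pvStep_length]; exact hn)]
    by_cases hv : 0 ≤ v
    · by_cases heq : pvWhileDigits v.toNat 0 = i
      · have hk : pvWhileDigits v.toNat 0 < n := by omega
        have hd : (decide (0 ≤ v ∧ pvWhileDigits v.toNat 0 = i)) = true := by simp [hv, heq]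
        rw [hd]
        unfold pvStep
        rw [if_pos hv, if_pos hk, heq]
        have hset : (f.set i (f.getD i 0 + 1)).getD i 0 = f.getD i 0 + 1 := by
          simp [List.getD_eq_getElem?_getD, hi]
        rw [hset]
        simp only [if_true]
        push_cast; ring
      · have hd : (decide (0 ≤ v ∧ pvWhileDigits v.toNat 0 = i)) = false := by simp [heq]
        rw [hd]
        unfold pvStep
        rw [if_pos hv]
        by_cases hk : pvWhileDigits v.toNat 0 < n
        · rw [if_pos hk]
          have hset : (f.set (pvWhileDigits v.toNat 0) (f.getD (pvWhileDigits v.toNat 0) 0 + 1)).getD i 0 = f.getD i 0 := by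
            simp [List.getD_eq_getElem?_getD, heq]
          rw [hset]; simp
        · rw [if_neg hk]; simp
    · have hd : (decide (0 ≤ v ∧ pvWhileDigits v.toNat 0 = i)) = false := by simp [hv]
      rw [hd]
      unfold pvStep
      rw [if_neg hv]
      simp

-- ===== VERDICT (by name: the statement is the Claim_ definition above) =====
theorem class_frequencies_spec : Claim_equal_class_frequencies := by
  intro vs L _
  unfold Spec_class_frequencies class_frequencies class_frequencies_alt
  set n : Nat := if L > 0 then L.toNat else 0 with hn
  have hLn : (L - 0).toNat = n := by rw [hn]; split_ifs <;> omega
  rw [outer_map]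
  apply List.ext_getElem
  · simp only [List.nil_append, List.length_map, PySem.List.length_pyRange_one,
      foldl_pvStep_length, List.length_replicate]
    exact hLn
  · intro i h1 h2
    have hin : i < n := by
      simpa only [foldl_pvStep_length, List.length_replicate] using h2
    have hilt : i < (PySem.List.pyRange 0 L 1).length := by
      simp only [PySem.List.length_pyRange_one]; omega
    have hgetA : (PySem.List.pyRange 0 L 1)[i]'hilt = (i : Int) := by
      rw [PySem.List.getElem_pyRange_one]; ring
    simp only [List.nil_append, List.getElem_map]
    rw [hgetA]
    rw [inner_count (fun value => class_minimum_value (i : Int) ≤ value ∧ value ≤ class_maximum_value (i : Int)) vs 0]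
    have hB := foldl_pvStep_getD n vs (List.replicate n 0) i (by simpa using hin) (by simp)
    have hBlen : i < (vs.foldl (pvStep n) (List.replicate n 0)).length := by
      simpa only [foldl_pvStep_length, List.length_replicate] using hin
    rw [List.getD_eq_getElem?_getD, List.getElem?_eq_getElem hBlen] at hB
    simp only [Option.getD_some] at hB
    rw [hB]
    have hrep : (List.replicate n (0 : Int)).getD i 0 = 0 := by
      simp [List.getD_eq_getElem?_getD, hin]
    rw [hrep, zero_add]
    congr 1
    rw [Nat.zero_add]
    apply List.countP_congr
    intro v _
    simp only [decide_eq_true_eq]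
    exact pred_equiv i v
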